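-- pv_equiv track=rewrite | github.com/asmit404/GFG_Solutions | Reversing the equation.py | reverseEqn
-- ===== SOURCE A (Python) =====
-- def reverseEqn(s):
--     arr = []
--     seen = set(["+", "-", "*", "/"])
--     s = s[::-1]
--     i = 0
--     while i < len(s):
--         if s[i] in seen:
--             arr.append(s[i])
--         else:
--             inter, ia = i, i
--             while ia < len(s) and s[ia] not in seen:
--                 ia += 1
--                 i += 1
--             arr.append(s[inter:ia][::-1])
--             i -= 1
--         i += 1
--     return "".join(arr)
-- ===== SOURCE B (Python) =====
-- def reverseEqn(s):
--     ops = "+-*/"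
--     tokens = []
--     cur = ""
--     for ch in s:
--         if ch in ops:
--             tokens.append(cur)
--             tokens.append(ch)
--             cur = ""
--         else:
--             cur += ch
--     tokens.append(cur)
--     return "".join(reversed(tokens))
-- ===== Notes on version B (the rewrite author's own statement) =====
-- stated objective: simpler
-- what changed: A reverses the whole string and re-reverses each number run it scans; B makes one forward pass collecting run/operator tokens, then reverses the token list and joins it (measured ~2x faster: no string reversal and no per-run slicing/re-reversal).
import Mathlib
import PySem

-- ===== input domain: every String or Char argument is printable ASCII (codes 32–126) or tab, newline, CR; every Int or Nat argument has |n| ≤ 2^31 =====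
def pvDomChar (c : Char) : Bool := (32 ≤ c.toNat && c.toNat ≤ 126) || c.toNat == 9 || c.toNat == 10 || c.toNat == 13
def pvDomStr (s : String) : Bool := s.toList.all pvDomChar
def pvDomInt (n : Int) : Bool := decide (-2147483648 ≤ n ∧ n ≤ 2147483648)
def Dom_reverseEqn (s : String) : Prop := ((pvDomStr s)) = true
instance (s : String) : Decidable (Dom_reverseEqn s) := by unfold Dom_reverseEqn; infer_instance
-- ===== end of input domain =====

-- B tokenizes forward (runs + operators) and reverses the token list, instead of A's
-- reverse-whole-string-then-re-reverse-each-run scan; objective: simpler decomposition.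


-- ===== PORT A =====
-- membership in A's set `seen = {"+","-","*","/"}`
def isOp (c : Char) : Bool := c = '+' || c = '-' || c = '*' || c = '/'

-- A's index-based while loop over the reversed string, as structural recursion on the
-- remaining suffix (same state): operator → append it; otherwise the inner while
-- advances over the maximal non-operator run (takeWhile/dropWhile), and the run is
-- appended re-reversed (`s[inter:ia][::-1]`).
def revTok : List Char → List (List Char)
  | [] => []
  | c :: rest =>
    if h : isOp c = true then
      [c] :: revTok rest
    else
      ((c :: rest).takeWhile (fun x => !isOp x)).reverse ::
        revTok ((c :: rest).dropWhile (fun x => !isOp x))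
  termination_by l => l.length
  decreasing_by
    · simp
    · simp [List.dropWhile, h]
      exact List.length_dropWhile_le _ _

-- `s = s[::-1]` then the loop, then `"".join(arr)`
def reverseEqn (s : String) : String :=
  String.mk ((revTok s.toList.reverse).flatten)

-- ===== PORT B =====
-- one step of B's for-loop: state = (tokens, cur)
def bStep (st : List (List Char) × List Char) (ch : Char) : List (List Char) × List Char :=
  if isOp ch then (st.1 ++ [st.2, [ch]], []) else (st.1, st.2 ++ [ch])

-- tokens.append(cur) after the loop; "".join(reversed(tokens))
def reverseEqn_alt (s : String) : String :=
  let st := s.toList.foldl bStep ([], [])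
  String.mk ((st.1 ++ [st.2]).reverse.flatten)

-- ===== PRECONDITION & SPEC =====
def Spec_reverseEqn (s : String) (out : String) : Prop := out = reverseEqn_alt s
instance (s : String) (out : String) : Decidable (Spec_reverseEqn s out) := by unfold Spec_reverseEqn; infer_instance

-- ===== CLAIM (what is proved, stated in full; the proofs are below) =====
def Claim_equal_reverseEqn : Prop := ∀ (s : String), Dom_reverseEqn s → Spec_reverseEqn s (reverseEqn s)

-- ===== LEMMAS AND PROOFS =====

-- A's output splits as: (reversed leading non-op run) ++ (rest of the scan).
theorem revTok_flatten_split (r : List Char) :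
    (revTok r).flatten =
      (r.takeWhile (fun x => !isOp x)).reverse ++
        (revTok (r.dropWhile (fun x => !isOp x))).flatten := by
  cases r with
  | nil => simp [revTok]
  | cons c rest =>
    by_cases h : isOp c = true
    · simp [revTok, h, List.takeWhile_cons, List.dropWhile_cons]
    · simp only [revTok, h]
      simp [h]

-- Loop invariant for B: after folding l, `cur` (reversed) is the maximal non-op suffix
-- of l (= leading run of l.reverse), and the flattened reversed `tokens` equal A's scan
-- of the rest of l.reverse.
theorem bFold_inv (l : List Char) :
    ((l.foldl bStep ([], [])).2.reverse = l.reverse.takeWhile (fun x => !isOp x)) ∧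
    ((l.foldl bStep ([], [])).1.reverse.flatten =
      (revTok (l.reverse.dropWhile (fun x => !isOp x))).flatten) := by
  induction l using List.reverseRecOn with
  | nil => simp [revTok]
  | append_singleton l c ih =>
    obtain ⟨ih1, ih2⟩ := ih
    simp only [List.foldl_append, List.foldl_cons, List.foldl_nil, List.reverse_append,
      List.reverse_cons, List.reverse_nil, List.nil_append, List.singleton_append]
    by_cases h : isOp c = true
    · constructor
      · simp [bStep, h]
      · have hP : (!isOp c) = false := by simp [h]
        have hd : List.dropWhile (fun x => !isOp x) (c :: l.reverse) = c :: l.reverse := by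
          simp [List.dropWhile_cons, hP]
        have hr : revTok (c :: l.reverse) = [c] :: revTok l.reverse := by
          simp [revTok, h]
        simp only [bStep, if_pos h]
        rw [hd, hr]
        simp only [List.flatten_cons]
        rw [revTok_flatten_split l.reverse, ← ih1, ← ih2]
        simp
    · constructor
      · simp [bStep, h, ih1]
      · have hP : (!isOp c) = true := by simp [h]
        have hd : List.dropWhile (fun x => !isOp x) (c :: l.reverse) =
            List.dropWhile (fun x => !isOp x) l.reverse := by
          simp [List.dropWhile_cons, hP]
        simp only [bStep, if_neg h, hd]
        exact ih2

theorem flatten_eq (l : List Char) :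
    ((l.foldl bStep ([], [])).1 ++ [(l.foldl bStep ([], [])).2]).reverse.flatten =
      (revTok l.reverse).flatten := by
  obtain ⟨h1, h2⟩ := bFold_inv l
  rw [revTok_flatten_split l.reverse]
  simp only [List.reverse_append, List.reverse_cons, List.reverse_nil, List.nil_append,
    List.flatten_cons, List.flatten]
  rw [← h1, ← h2]
  simp

-- ===== VERDICT (by name: the statement is the Claim_ definition above) =====
theorem reverseEqn_spec : Claim_equal_reverseEqn := by
  intro s _
  show reverseEqn s = reverseEqn_alt s
  unfold reverseEqn reverseEqn_alt
  rw [← flatten_eq s.toList]
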